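-- pv_equiv track=rewrite | github.com/pruvi007/InterViewBit_Academy | backtracking/sixlets.py | sixlets
-- ===== SOURCE A (Python) =====
-- def sixlets(a,level,sum,size,b):
--     if size>b:
--         return 0
--
--     if sum<=1000 and size==b:
--         return 1
--     if level>=len(a):
--         return 0
--     return sixlets( a,level+1,sum+a[level],size+1,b ) + sixlets( a,level+1,sum,size,b )
-- ===== SOURCE B (Python) =====
-- def sixlets(a, level, sum, size, b):
--     need = b - size
--     if need < 0:
--         return 0
--     tail = a[level:]
--     if need > len(tail):
--         return 0
--     cap = 1000 - sum
--     # dp[j] holds the sums of all j-element subsets of the scanned prefix of tail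
--     dp = [[0]] + [[] for _ in range(need)]
--     for x in tail:
--         dp = [dp[0]] + [cur + [s + x for s in prev] for prev, cur in zip(dp, dp[1:])]
--     return len([s for s in dp[-1] if s <= cap])
-- ===== Notes on version B (the rewrite author's own statement) =====
-- stated objective: alternative
-- what changed: A's top-down include/exclude recursion over the whole suffix is replaced by one iterative fold that maintains a layered table (one row of subset sums per subset size up to b-size, rows beyond the target size pruned) and reads the answer off the last row, with an up-front 0 when more elements are needed than remain.
-- outside the precondition, e.g. on sixlets([5, 7], -1, 0, 0, 1): A returns 3, B returns 1; on sixlets([1, 2, 3], -2, 0, 0, 2): A returns 10, B returns 1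
import Mathlib
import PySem

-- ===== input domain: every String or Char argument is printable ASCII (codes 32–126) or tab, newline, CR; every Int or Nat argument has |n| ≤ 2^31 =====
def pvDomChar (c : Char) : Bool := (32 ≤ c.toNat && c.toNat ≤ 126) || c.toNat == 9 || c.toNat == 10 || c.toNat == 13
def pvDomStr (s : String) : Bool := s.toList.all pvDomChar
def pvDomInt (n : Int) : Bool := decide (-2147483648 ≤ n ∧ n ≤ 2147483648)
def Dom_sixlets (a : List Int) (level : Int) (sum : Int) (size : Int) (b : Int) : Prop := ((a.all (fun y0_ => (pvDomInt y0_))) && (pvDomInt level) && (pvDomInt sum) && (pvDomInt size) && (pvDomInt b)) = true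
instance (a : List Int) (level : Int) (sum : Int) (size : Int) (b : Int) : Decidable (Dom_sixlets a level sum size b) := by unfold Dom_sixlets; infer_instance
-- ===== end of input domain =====

-- B replaces A's exponential include/exclude recursion by an iterative layered subset-sum
-- table (one row per subset size) folded once over the scanned suffix (objective: alternative).

-- ===== PORT A =====
def sixlets (a : List Int) (level : Int) (sum : Int) (size : Int) (b : Int) : Int :=
  if size > b then 0
  else if sum ≤ 1000 ∧ size = b then 1
  else if level ≥ (a.length : Int) then 0
  else
    match PySem.List.pyGet? a level with
    | some x => sixlets a (level + 1) (sum + x) (size + 1) b + sixlets a (level + 1) sum size b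
    | none => 0   -- Python raises IndexError here (level < -len(a)); excluded by Pre_sixlets
termination_by ((a.length : Int) - level).toNat
decreasing_by all_goals (simp_wf; omega)

-- ===== PORT B =====
-- one fold step: dp = [dp[0]] + [cur + [s + x for s in prev] for prev, cur in zip(dp, dp[1:])]
def pvStep (x : Int) (dp : List (List Int)) : List (List Int) :=
  match dp with
  | [] => []
  | h :: t => h :: List.zipWith (fun prev cur => cur ++ prev.map (fun s => s + x)) (h :: t) t

def sixlets_alt (a : List Int) (level : Int) (sum : Int) (size : Int) (b : Int) : Int :=
  let need := b - size
  if need < 0 then 0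
  else
    let tail := PySem.List.slice a (some level) none
    if need > (tail.length : Int) then 0
    else
      let cap := 1000 - sum
      let dp0 : List (List Int) := [[(0 : Int)]] ++ (PySem.List.pyRange 0 need 1).map (fun _ => ([] : List Int))
      let dp := tail.foldl (fun d x => pvStep x d) dp0
      match PySem.List.pyGet? dp (-1) with
      | some row => ((row.filter (fun s => s ≤ cap)).length : Int)
      | none => 0

-- ===== PRECONDITION & SPEC =====
-- Pre_ restricts to the function's natural domain: a start index level ≥ 0 (kept inside: inputs
-- where A returns without touching the list); for an in-range negative level Python's
-- negative-index wraparound makes A scan the suffix and then the whole list again, double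
-- counting, and for level < -len(a) A raises IndexError.
def Pre_sixlets (a : List Int) (level : Int) (sum : Int) (size : Int) (b : Int) : Prop :=
  0 ≤ level ∨ b < size ∨ (sum ≤ 1000 ∧ size = b)
instance (a : List Int) (level : Int) (sum : Int) (size : Int) (b : Int) : Decidable (Pre_sixlets a level sum size b) := by unfold Pre_sixlets; infer_instance

def pvWitness_sixlets : List Int × Int × Int × Int × Int := ([1, 2, 3], 0, 0, 0, 2)

def Spec_sixlets (a : List Int) (level : Int) (sum : Int) (size : Int) (b : Int) (out : Int) : Prop := out = sixlets_alt a level sum size b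
instance (a : List Int) (level : Int) (sum : Int) (size : Int) (b : Int) (out : Int) : Decidable (Spec_sixlets a level sum size b out) := by unfold Spec_sixlets; infer_instance

-- ===== CLAIM (what is proved, stated in full; the proofs are below) =====
def Claim_equal_sixlets : Prop := ∀ (a : List Int) (level : Int) (sum : Int) (size : Int) (b : Int), Dom_sixlets a level sum size b → Pre_sixlets a level sum size b → Spec_sixlets a level sum size b (sixlets a level sum size b)

-- ===== LEMMAS AND PROOFS =====

-- pvN tail need cap = number of sublists of tail of length need whose sum is ≤ cap,
-- written with A's head-first recursion shape.
def pvN : List Int → Int → Int → Int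
  | [], need, cap => if need = 0 ∧ 0 ≤ cap then 1 else 0
  | x :: r, need, cap =>
      if need < 0 then 0
      else if need = 0 then (if 0 ≤ cap then 1 else 0)
      else pvN r (need - 1) (cap - x) + pvN r need cap

lemma pvN_neg (l : List Int) (need cap : Int) (h : need < 0) : pvN l need cap = 0 := by
  cases l <;> simp [pvN] <;> omega

lemma pvN_zero (l : List Int) (cap : Int) : pvN l 0 cap = if 0 ≤ cap then 1 else 0 := by
  cases l <;> simp [pvN]

lemma pvN_cons_split (x : Int) (r : List Int) (need cap : Int) :
    pvN (x :: r) need cap = pvN r (need - 1) (cap - x) + pvN r need cap := by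
  by_cases h0 : need < 0
  · rw [pvN_neg _ _ _ h0, pvN_neg _ _ _ (by omega), pvN_neg _ _ _ h0]; ring
  · by_cases h1 : need = 0
    · subst h1
      simp [pvN, pvN_neg r (-1) (cap - x) (by omega), pvN_zero]
    · simp [pvN, h0, h1]

lemma pvN_big (l : List Int) (need cap : Int) (h : (l.length : Int) < need) : pvN l need cap = 0 := by
  induction l generalizing need cap with
  | nil => simp at h; simp [pvN]; omega
  | cons x r ih =>
    rw [pvN_cons_split, ih _ _ (by simp at h ⊢; omega), ih _ _ (by simp at h ⊢; omega)]; ring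

-- A computes pvN on the dropped suffix.
lemma sixlets_char (a : List Int) (level sum size b : Int) (hl : 0 ≤ level) :
    sixlets a level sum size b = pvN (a.drop level.toNat) (b - size) (1000 - sum) := by
  fun_induction sixlets a level sum size b with
  | case1 level sum size hgt =>
    exact (pvN_neg _ _ _ (by omega)).symm
  | case2 level sum size hgt heq =>
    have e : b - size = 0 := by omega
    rw [e, pvN_zero, if_pos (by omega)]
  | case3 level sum size hgt heq hge =>
    rw [List.drop_eq_nil_of_le (by omega)]
    simp only [pvN]
    rw [if_neg]
    rintro ⟨e1, e2⟩
    omega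
  | case4 level sum size hgt heq hge x hx ih2 ih1 =>
    have hlt : level.toNat < a.length := by omega
    have hx' := PySem.List.pyGet?_eq_some_getElem (xs := a) (i := level) hl (by omega)
    rw [hx] at hx'
    have hxv : x = a[level.toNat] := by injection hx'
    rw [List.drop_eq_getElem_cons hlt, ← hxv, pvN_cons_split,
        ih2 (by omega), ih1 (by omega)]
    have e1 : (level + 1).toNat = level.toNat + 1 := by omega
    have e2 : b - (size + 1) = b - size - 1 := by ring
    have e3 : 1000 - (sum + x) = 1000 - sum - x := by ring
    rw [e1, e2, e3]
  | case5 level sum size hgt heq hge hx =>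
    have hx' := PySem.List.pyGet?_eq_some_getElem (xs := a) (i := level) hl (by omega)
    rw [hx] at hx'
    exact absurd hx' (by simp)

-- the weighted evaluation of a dp table against a remaining tail
def pvG (cap : Int) (tail : List Int) : List (List Int) → Int → Int
  | [], _ => 0
  | row :: rest, need => (row.map (fun s => pvN tail need (cap - s))).sum + pvG cap tail rest (need - 1)

lemma pvStep_length (x : Int) (dp : List (List Int)) : (pvStep x dp).length = dp.length := by
  cases dp <;> simp [pvStep]

lemma foldl_pvStep_length (tail : List Int) (dp : List (List Int)) :
    (tail.foldl (fun d x => pvStep x d) dp).length = dp.length := by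
  induction tail generalizing dp with
  | nil => rfl
  | cons x r ih => simp only [List.foldl_cons]; rw [ih, pvStep_length]

lemma sum_map_pvN_cons (x : Int) (r : List Int) (cap need : Int) (h : List Int) :
    (h.map (fun s => pvN (x :: r) need (cap - s))).sum =
      (h.map (fun s => pvN r need (cap - s))).sum
        + ((h.map (fun s => s + x)).map (fun s => pvN r (need - 1) (cap - s))).sum := by
  induction h with
  | nil => rfl
  | cons y ys ih =>
    simp only [List.map_cons, List.sum_cons]
    rw [ih, pvN_cons_split]
    have e : cap - (y + x) = cap - y - x := by ring
    rw [e]; ring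

lemma pvG_pvStep (x : Int) (r : List Int) (cap : Int) :
    ∀ (dp : List (List Int)) (need : Int), need < (dp.length : Int) →
      pvG cap r (pvStep x dp) need = pvG cap (x :: r) dp need := by
  intro dp
  induction dp with
  | nil => intro need _; rfl
  | cons h t ih =>
    intro need hlen
    cases t with
    | nil =>
      have h1 : ∀ z ∈ (h.map (fun s => s + x)).map (fun s => pvN r (need - 1) (cap - s)), z = 0 := by
        intro z hz
        simp only [List.mem_map] at hz
        obtain ⟨s, -, rfl⟩ := hz
        exact pvN_neg _ _ _ (by simp at hlen; omega)
      simp only [pvStep, List.zipWith, pvG]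
      rw [sum_map_pvN_cons x r cap need h, List.sum_eq_zero h1]
      ring
    | cons h2 t2 =>
      have ih2 := ih (need - 1) (by simp at hlen ⊢; omega)
      simp only [pvStep, List.zipWith, pvG] at ih2 ⊢
      rw [sum_map_pvN_cons x r cap need h]
      rw [← ih2]
      simp only [List.map_append, List.sum_append]
      ring

lemma pvG_foldl (cap : Int) (tail : List Int) :
    ∀ (dp : List (List Int)) (need : Int), need < (dp.length : Int) →
      pvG cap [] (tail.foldl (fun d x => pvStep x d) dp) need = pvG cap tail dp need := by
  induction tail with
  | nil => intro dp need _; rfl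
  | cons x r ih =>
    intro dp need h
    simp only [List.foldl_cons]
    rw [ih _ _ (by rw [pvStep_length]; exact h), pvG_pvStep _ _ _ _ _ h]

lemma sum_map_pvN_nil_zero (cap : Int) (h : List Int) :
    (h.map (fun s => pvN [] 0 (cap - s))).sum = ((h.filter (fun s => s ≤ cap)).length : Int) := by
  induction h with
  | nil => rfl
  | cons y ys ih =>
    simp only [List.map_cons, List.sum_cons, ih, List.filter_cons]
    by_cases hy : y ≤ cap
    · simp [pvN, hy, show (0:Int) ≤ cap - y by omega]; omega
    · simp [pvN, hy, show ¬(0:Int) ≤ cap - y by omega]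

lemma pvG_last (cap : Int) :
    ∀ (t : List (List Int)) (h : List Int),
      pvG cap [] (h :: t) (t.length : Int) =
        (((h :: t).getLastD []).filter (fun s => s ≤ cap)).length := by
  intro t
  induction t with
  | nil =>
    intro h
    simp only [List.length_nil, Int.natCast_zero, pvG, List.getLastD]
    rw [sum_map_pvN_nil_zero]
    simp
  | cons h2 t2 ih =>
    intro h
    have hz : ∀ z ∈ h.map (fun s => pvN [] ((h2 :: t2).length : Int) (cap - s)), z = 0 := by
      intro z hz
      simp only [List.mem_map] at hz
      obtain ⟨s, -, rfl⟩ := hz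
      simp only [pvN, List.length_cons]
      rw [if_neg]
      intro hcon
      omega
    have step : pvG cap [] (h :: h2 :: t2) ((h2 :: t2).length : Int) =
        pvG cap [] (h2 :: t2) ((t2.length : Int)) := by
      simp only [pvG]
      rw [List.sum_eq_zero hz]
      have : ((h2 :: t2).length : Int) - 1 = (t2.length : Int) := by simp
      rw [this]
      ring
    rw [step, ih h2]
    rfl

lemma pvG_nil_rows (cap : Int) (tail : List Int) {α : Type} :
    ∀ (l : List α) (k : Int), pvG cap tail (l.map (fun _ => ([] : List Int))) k = 0 := by
  intro l
  induction l with
  | nil => intro k; rfl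
  | cons y ys ih =>
    intro k
    simp only [List.map_cons, pvG, List.map_nil, List.sum_nil, zero_add]
    exact ih (k - 1)

lemma foldl_pvStep_keep (tail : List Int) :
    tail.foldl (fun d x => pvStep x d) [[(0 : Int)]] = [[(0 : Int)]] := by
  induction tail with
  | nil => rfl
  | cons x r ih => simpa [pvStep] using ih

lemma getLast?_cons_getLastD (h : List Int) (t : List (List Int)) :
    (h :: t).getLast? = some ((h :: t).getLastD []) := by
  induction t generalizing h with
  | nil => rfl
  | cons y ys ih => simpa using ih y

lemma alt_char (a : List Int) (level sum size b : Int) (hl : 0 ≤ level) (hge : 0 ≤ b - size) :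
    sixlets_alt a level sum size b = pvN (a.drop level.toNat) (b - size) (1000 - sum) := by
  unfold sixlets_alt
  rw [if_neg (by omega), PySem.List.slice_from a hl]
  by_cases hbig : b - size > ((a.drop level.toNat).length : Int)
  · rw [if_pos hbig, pvN_big _ _ _ hbig]
  · rw [if_neg hbig]
    show (match PySem.List.pyGet?
        ((a.drop level.toNat).foldl (fun d x => pvStep x d)
          ([[(0 : Int)]] ++ (PySem.List.pyRange 0 (b - size) 1).map (fun _ => ([] : List Int)))) (-1) with
      | some row => ((row.filter (fun s => s ≤ 1000 - sum)).length : Int)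
      | none => 0) = pvN (a.drop level.toNat) (b - size) (1000 - sum)
    have hstart : pvG (1000 - sum) (a.drop level.toNat)
        ([[(0 : Int)]] ++ (PySem.List.pyRange 0 (b - size) 1).map (fun _ => ([] : List Int)))
        (b - size) = pvN (a.drop level.toNat) (b - size) (1000 - sum) := by
      show ([(0 : Int)].map (fun s => pvN (a.drop level.toNat) (b - size) (1000 - sum - s))).sum
          + pvG (1000 - sum) (a.drop level.toNat)
              ((PySem.List.pyRange 0 (b - size) 1).map (fun _ => ([] : List Int))) (b - size - 1)
        = pvN (a.drop level.toNat) (b - size) (1000 - sum)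
      rw [pvG_nil_rows]
      simp
    generalize hdp : (a.drop level.toNat).foldl (fun d x => pvStep x d)
      ([[(0 : Int)]] ++ (PySem.List.pyRange 0 (b - size) 1).map (fun _ => ([] : List Int))) = dp
    have hlen : dp.length = (b - size).toNat + 1 := by
      rw [← hdp, foldl_pvStep_length]
      simp only [List.length_append, List.length_map, List.length_cons, List.length_nil,
        PySem.List.length_pyRange_one]
      omega
    cases dp with
    | nil => simp at hlen
    | cons h t =>
      have htl : (t.length : Int) = b - size := by simp at hlen; omega
      rw [PySem.List.pyGet?_neg_one, getLast?_cons_getLastD]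
      show (((h :: t).getLastD []).filter (fun s => s ≤ 1000 - sum)).length
        = pvN (a.drop level.toNat) (b - size) (1000 - sum)
      rw [← pvG_last (1000 - sum) t h, htl, ← hdp,
        pvG_foldl (1000 - sum) (a.drop level.toNat) _ _ (by
          simp only [List.length_append, List.length_map, List.length_cons, List.length_nil,
            PySem.List.length_pyRange_one]
          omega)]
      exact hstart

-- ===== VERDICT (by name: the statement is the Claim_ definition above) =====
theorem sixlets_spec : Claim_equal_sixlets := by
  intro a level sum size b _ hpre
  unfold Spec_sixlets
  by_cases h1 : size > b
  · rw [sixlets, if_pos h1]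
    unfold sixlets_alt
    rw [if_pos (by omega)]
  · by_cases h2 : sum ≤ 1000 ∧ size = b
    · rw [sixlets, if_neg h1, if_pos h2]
      unfold sixlets_alt
      rw [if_neg (by omega), if_neg (by omega)]
      have e0 : PySem.List.pyRange 0 (b - size) 1 = [] :=
        PySem.List.pyRange_one_eq_nil (by omega)
      rw [e0]
      simp only [List.map_nil, List.append_nil]
      rw [foldl_pvStep_keep, PySem.List.pyGet?_neg_one]
      simp [h2.1]
    · have hl : 0 ≤ level := by
        unfold Pre_sixlets at hpre
        rcases hpre with h | h | h
        · exact h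
        · omega
        · exact absurd h h2
      rw [sixlets_char a level sum size b hl, alt_char a level sum size b hl (by omega)]
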